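-- pv_equiv track=rewrite | github.com/MrBrantCode/unitest_baseline | mut_generate/mist_train_taco/taco_8465/solution.py | find_concatenated_strings
-- ===== SOURCE A (Python) =====
-- def find_concatenated_strings(test_cases):
--     results = []
--
--     for case in test_cases:
--         n = len(case)
--         strings_set = set(case)
--         result = ''
--
--         for s in case:
--             found = False
--             for k in range(1, len(s)):
--                 if s[k:] in strings_set and s[:k] in strings_set:
--                     result += '1'
--                     found = True
--                     break
--             if not found:
--                 result += '0'
--
--         results.append(result)
--
--     return results
-- ===== SOURCE B (Python) =====
-- def find_concatenated_strings(test_cases):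
--     # For each string, instead of trying every split point, scan the distinct
--     # set members and check whether some member is a proper nonempty prefix
--     # whose complementary suffix is also a member.
--     results = []
--     for case in test_cases:
--         members = set(case)
--         results.append(''.join(
--             '1' if any(1 <= len(w) < len(s) and s.startswith(w) and s[len(w):] in members
--                        for w in members)
--             else '0'
--             for s in case))
--     return results
-- ===== Notes on version B (the rewrite author's own statement) =====
-- stated objective: alternative
-- what changed: Instead of trying every split point k of each string and slicing twice per k, B scans the distinct set members once per string, checking whether some member is a proper nonempty prefix whose complementary suffix is also a member; the per-case scaffolding becomes a join over a comprehension instead of string accumulation.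
import Mathlib
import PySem

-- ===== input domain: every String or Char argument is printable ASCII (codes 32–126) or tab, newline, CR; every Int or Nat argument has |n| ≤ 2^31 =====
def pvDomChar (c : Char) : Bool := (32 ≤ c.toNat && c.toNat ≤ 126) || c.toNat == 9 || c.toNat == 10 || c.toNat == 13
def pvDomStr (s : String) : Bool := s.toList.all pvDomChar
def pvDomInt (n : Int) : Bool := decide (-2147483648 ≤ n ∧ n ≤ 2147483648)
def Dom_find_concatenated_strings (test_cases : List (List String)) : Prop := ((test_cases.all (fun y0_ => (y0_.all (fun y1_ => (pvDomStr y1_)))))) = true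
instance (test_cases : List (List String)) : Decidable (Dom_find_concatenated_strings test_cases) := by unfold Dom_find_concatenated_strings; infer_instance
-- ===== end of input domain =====

-- B replaces A's per-string scan over all split points (two slices per split) by a scan over
-- the distinct set members (proper nonempty prefix member whose complementary suffix is a member);
-- objective: alternative traversal, same results.

-- ===== PORT A =====
-- the inner 'for k in range(1, len(s)): … break' loop; returns Python's 'found' flag
def pvAFound (strings_set : PySem.Set String) (s : String) : List Int → Bool
  | [] => false
  | k :: ks =>
      if PySem.Set.contains strings_set (PySem.Str.slice s (some k) none)
          && PySem.Set.contains strings_set (PySem.Str.slice s none (some k)) then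
        true
      else pvAFound strings_set s ks

-- Python's accumulated str 'result' is carried as its list of characters (exact: '' = [], += '1'/'0' = ++ ['1'/'0'])
def find_concatenated_strings (test_cases : List (List String)) : List String :=
  test_cases.foldl (fun results case =>
    let strings_set := PySem.Set.ofList case
    let result := case.foldl (fun result s =>
      if pvAFound strings_set s (PySem.List.pyRange 1 (PySem.Str.len s) 1) then
        result ++ ['1']
      else
        result ++ ['0']) ([] : List Char)
    results ++ [String.ofList result]) []

-- ===== PORT B =====
def find_concatenated_strings_alt (test_cases : List (List String)) : List String :=
  test_cases.map (fun case =>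
    let members := PySem.Set.ofList case
    PySem.Str.join "" (case.map (fun s =>
      if members.any (fun w =>
          (1 ≤ PySem.Str.len w && PySem.Str.len w < PySem.Str.len s)
          && PySem.Str.startswith s w
          && PySem.Set.contains members (PySem.Str.slice s (some (PySem.Str.len w)) none)) then
        "1"
      else "0")))

-- ===== PRECONDITION & SPEC =====
def Spec_find_concatenated_strings (test_cases : List (List String)) (out : List String) : Prop := out = find_concatenated_strings_alt test_cases
instance (test_cases : List (List String)) (out : List String) : Decidable (Spec_find_concatenated_strings test_cases out) := by unfold Spec_find_concatenated_strings; infer_instance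

-- ===== CLAIM (what is proved, stated in full; the proofs are below) =====
def Claim_equal_find_concatenated_strings : Prop := ∀ (test_cases : List (List String)), Dom_find_concatenated_strings test_cases → Spec_find_concatenated_strings test_cases (find_concatenated_strings test_cases)

-- ===== LEMMAS AND PROOFS =====

-- A's break-loop is an existence test over the remaining split points
theorem pvAFound_eq_any (st : PySem.Set String) (s : String) (ks : List Int) :
    pvAFound st s ks
      = ks.any (fun k =>
          PySem.Set.contains st (PySem.Str.slice s (some k) none)
          && PySem.Set.contains st (PySem.Str.slice s none (some k))) := by
  induction ks with
  | nil => rfl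
  | cons k ks ih =>
      simp [pvAFound, ih]

-- per string: 'some split point works' (A) = 'some set member is a fitting prefix' (B)
theorem pvKey (case : List String) (s : String) :
    pvAFound (PySem.Set.ofList case) s (PySem.List.pyRange 1 (PySem.Str.len s) 1)
      = (PySem.Set.ofList case).any (fun w =>
          (1 ≤ PySem.Str.len w && PySem.Str.len w < PySem.Str.len s)
          && PySem.Str.startswith s w
          && PySem.Set.contains (PySem.Set.ofList case) (PySem.Str.slice s (some (PySem.Str.len w)) none)) := by
  have hs : PySem.Str.len s = (s.toList.length : Int) := by simp [pysem]
  rw [pvAFound_eq_any, Bool.eq_iff_iff]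
  simp only [List.any_eq_true, PySem.List.mem_pyRange_one, Bool.and_eq_true,
    PySem.Set.contains_iff, PySem.Set.mem_ofList, decide_eq_true_eq]
  constructor
  · rintro ⟨k, ⟨hk1, hk2⟩, hsuf, hpre⟩
    have h0 : (0 : Int) ≤ k := by omega
    have hwt : (PySem.Str.slice s none (some k)).toList = s.toList.take k.toNat := by
      simp [pysem, PySem.List.slice_to _ h0]
    rw [hs] at hk2
    have hlen2 : (PySem.Str.slice s none (some k)).toList.length = k.toNat := by
      rw [hwt, List.length_take]
      omega
    have hlenw : PySem.Str.len (PySem.Str.slice s none (some k)) = k := by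
      have hb : PySem.Str.len (PySem.Str.slice s none (some k))
          = ((PySem.Str.slice s none (some k)).toList.length : Int) := by simp [pysem]
      rw [hb, hlen2]
      omega
    rw [← hs] at hk2
    refine ⟨PySem.Str.slice s none (some k), hpre, ⟨⟨?_, ?_⟩, ?_⟩, ?_⟩
    · rw [hlenw]; exact hk1
    · rw [hlenw]; exact hk2
    · have : s.toList.take k.toNat <+: s.toList := List.take_prefix _ _
      simp [pysem, PySem.Chars.startswith_iff, hwt, this]
    · rw [hlenw]; exact hsuf
  · rintro ⟨w, hw, ⟨⟨hw1, hw2⟩, hst⟩, hsuf⟩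
    have hlw : PySem.Str.len w = (w.toList.length : Int) := by simp [pysem]
    have h0 : (0 : Int) ≤ PySem.Str.len w := by omega
    have hpref : w.toList <+: s.toList := by
      simpa [pysem, PySem.Chars.startswith_iff] using hst
    have hweq : w.toList = s.toList.take w.toList.length := List.prefix_iff_eq_take.mp hpref
    have hwstr : PySem.Str.slice s none (some (PySem.Str.len w)) = w := by
      apply String.toList_inj.mp
      have hn : (PySem.Str.len w).toNat = w.toList.length := by omega
      simp only [PySem.Str.toList_slice, PySem.Chars.slice_eq_listSlice,
        PySem.List.slice_to _ h0, hn]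
      exact hweq.symm
    exact ⟨PySem.Str.len w, ⟨hw1, hw2⟩, hsuf, by rw [hwstr]; exact hw⟩

-- ===== VERDICT (by name: the statement is the Claim_ definition above) =====
theorem find_concatenated_strings_spec : Claim_equal_find_concatenated_strings := by
  intro test_cases _
  unfold Spec_find_concatenated_strings find_concatenated_strings find_concatenated_strings_alt
  rw [PySem.List.foldl_append_singleton_eq_map]
  simp only [List.nil_append]
  refine List.map_congr_left (fun case _ => ?_)
  have hfun : (fun (result : List Char) (s : String) =>
        if pvAFound (PySem.Set.ofList case) s (PySem.List.pyRange 1 (PySem.Str.len s) 1) then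
          result ++ ['1'] else result ++ ['0'])
      = (fun result s =>
        result ++ [if (PySem.Set.ofList case).any (fun w =>
            (1 ≤ PySem.Str.len w && PySem.Str.len w < PySem.Str.len s)
            && PySem.Str.startswith s w
            && PySem.Set.contains (PySem.Set.ofList case) (PySem.Str.slice s (some (PySem.Str.len w)) none))
          then '1' else '0']) := by
    funext result s
    rw [pvKey]
    split <;> rfl
  rw [hfun, PySem.List.foldl_append_singleton_eq_map]
  apply String.toList_inj.mp
  simp only [List.nil_append]
  have hmap : (case.map (fun s =>
        if (PySem.Set.ofList case).any (fun w =>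
            (1 ≤ PySem.Str.len w && PySem.Str.len w < PySem.Str.len s)
            && PySem.Str.startswith s w
            && PySem.Set.contains (PySem.Set.ofList case) (PySem.Str.slice s (some (PySem.Str.len w)) none))
          then "1" else "0")).map String.toList
      = (case.map (fun s =>
        if (PySem.Set.ofList case).any (fun w =>
            (1 ≤ PySem.Str.len w && PySem.Str.len w < PySem.Str.len s)
            && PySem.Str.startswith s w
            && PySem.Set.contains (PySem.Set.ofList case) (PySem.Str.slice s (some (PySem.Str.len w)) none))
          then '1' else '0')).map (fun c => [c]) := by
    simp only [List.map_map]
    refine List.map_congr_left (fun s _ => ?_)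
    simp only [Function.comp]
    split <;> rfl
  rw [String.toList_ofList, PySem.Str.toList_join,
    show ("" : String).toList = [] from rfl, hmap, PySem.Chars.join_nil_singletons]
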